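-- pv_equiv track=rewrite | github.com/CodingWithMinmer/CodingWithMinmer | 1_two_sum/python/second_variant_1_flip_dominoes.py | two_sum_second_variant
-- ===== SOURCE A (Python) =====
-- def two_sum_second_variant(dominoes: list[list[int, int]], target: int) -> int:
--     """
--     Time Complexity: O(n)
--     Space Complexity: O(n)
--     """
--     domino_to_freq = {}
--     result = 0
--     for a1, a2 in dominoes:
--         b1 = target - a1
--         b2 = target - a2
--         if (b1, b2) in domino_to_freq:
--             result += domino_to_freq[(b1, b2)]
--
--         if (a1, a2) in domino_to_freq:
--             domino_to_freq[(a1, a2)] += 1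
--         else:
--             domino_to_freq[(a1, a2)] = 1
--
--     return result
-- ===== SOURCE B (Python) =====
-- def two_sum_second_variant(dominoes: list[list[int, int]], target: int) -> int:
--     # Count each domino's complement among the LATER dominoes (complementation
--     # is an involution, so this counts the same unordered pairs); no dict needed.
--     result = 0
--     rest = list(dominoes)
--     while rest:
--         a1, a2 = rest.pop(0)
--         result += rest.count([target - a1, target - a2])
--     return result
-- ===== Notes on version B (the rewrite author's own statement) =====
-- stated objective: simpler
-- what changed: Replaces the prefix frequency-dictionary with a forward scan that counts each domino's complement among the later dominoes via list.count, relying on complementation being an involution.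
import Mathlib
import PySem

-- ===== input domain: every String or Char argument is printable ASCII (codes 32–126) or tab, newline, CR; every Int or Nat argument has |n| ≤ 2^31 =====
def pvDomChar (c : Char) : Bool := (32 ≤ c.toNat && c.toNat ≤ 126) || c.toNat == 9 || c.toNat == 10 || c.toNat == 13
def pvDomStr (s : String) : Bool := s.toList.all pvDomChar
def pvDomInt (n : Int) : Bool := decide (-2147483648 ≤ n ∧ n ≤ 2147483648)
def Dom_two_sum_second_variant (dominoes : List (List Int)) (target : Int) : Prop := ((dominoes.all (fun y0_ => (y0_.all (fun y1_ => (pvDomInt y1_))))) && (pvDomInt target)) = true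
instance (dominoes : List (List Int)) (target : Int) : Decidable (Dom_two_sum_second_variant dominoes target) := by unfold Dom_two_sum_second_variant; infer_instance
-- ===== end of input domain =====

-- B replaces A's prefix frequency-dictionary with a plain forward scan counting each
-- domino's complement among the later dominoes (objective: simpler; not faster).


-- ===== PORT A =====
-- One pass; dict maps each seen (a1, a2) tuple to its frequency among earlier dominoes.
def two_sum_second_variant (dominoes : List (List Int)) (target : Int) : Int :=
  (dominoes.foldl
    (fun (st : PySem.Dict (Int × Int) Int × Int) d =>
      match d with
      | [a1, a2] =>
        let b1 := target - a1
        let b2 := target - a2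
        let result := if st.1.contains (b1, b2) then st.2 + st.1.getD (b1, b2) 0 else st.2
        let dict := if st.1.contains (a1, a2)
                    then st.1.insert (a1, a2) (st.1.getD (a1, a2) 0 + 1)
                    else st.1.insert (a1, a2) 1
        (dict, result)
      | _ => st)  -- Python raises ValueError here (unpacking); excluded by Pre_
    (PySem.Dict.empty, 0)).2

-- ===== PORT B =====
-- while rest: a1, a2 = rest.pop(0); result += rest.count([target-a1, target-a2])
-- 'a1, a2 = d' then 'rest.count([target-a1, target-a2])'; a non-pair d raises
-- ValueError in Python (excluded by Pre_), totalized here as 0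
def pvAltPair (target : Int) (rest : List (List Int)) (d : List Int) : Int :=
  if d.length = 2 then (rest.count [target - d.getD 0 0, target - d.getD 1 0] : Int) else 0

def pvAltGo (target : Int) : List (List Int) → Int
  | [] => 0
  | d :: rest => pvAltPair target rest d + pvAltGo target rest

def two_sum_second_variant_alt (dominoes : List (List Int)) (target : Int) : Int :=
  pvAltGo target dominoes

-- ===== PRECONDITION & SPEC =====
-- Pre_ excludes dominoes that are not 2-element lists: on those the tuple unpacking
-- 'a1, a2 = …' raises ValueError in both Pythons.
def Pre_two_sum_second_variant (dominoes : List (List Int)) (target : Int) : Prop :=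
  ∀ d ∈ dominoes, d.length = 2
instance (dominoes : List (List Int)) (target : Int) : Decidable (Pre_two_sum_second_variant dominoes target) := by unfold Pre_two_sum_second_variant; infer_instance
def pvWitness_two_sum_second_variant : List (List Int) × Int := ([[1, 2], [3, 2], [2, 1]], 4)
def Spec_two_sum_second_variant (dominoes : List (List Int)) (target : Int) (out : Int) : Prop := out = two_sum_second_variant_alt dominoes target
instance (dominoes : List (List Int)) (target : Int) (out : Int) : Decidable (Spec_two_sum_second_variant dominoes target out) := by unfold Spec_two_sum_second_variant; infer_instance

-- ===== CLAIM (what is proved, stated in full; the proofs are below) =====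
def Claim_equal_two_sum_second_variant : Prop := ∀ (dominoes : List (List Int)) (target : Int), Dom_two_sum_second_variant dominoes target → Pre_two_sum_second_variant dominoes target → Spec_two_sum_second_variant dominoes target (two_sum_second_variant dominoes target)

-- ===== LEMMAS AND PROOFS =====

-- Pair-count of A's loop, with the already-seen pairs made explicit.
def pvM (target : Int) (seen : List (Int × Int)) : List (List Int) → Int
  | [] => 0
  | d :: ds =>
    match d with
    | [a1, a2] => (seen.count (target - a1, target - a2) : Int) + pvM target ((a1, a2) :: seen) ds
    | _ => pvM target seen ds

-- cross-pairs between the seen prefix and the remaining list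
def pvCross (target : Int) (seen : List (Int × Int)) (ds : List (List Int)) : Int :=
  (seen.map (fun p => (ds.count [target - p.1, target - p.2] : Int))).sum


theorem pvA_loop (target : Int) (ds : List (List Int)) :
    ∀ (dict : PySem.Dict (Int × Int) Int) (res : Int) (seen : List (Int × Int)),
    (∀ k, dict.contains k = decide (k ∈ seen)) →
    (∀ k, dict.getD k 0 = (seen.count k : Int)) →
    (ds.foldl
      (fun (st : PySem.Dict (Int × Int) Int × Int) d =>
        match d with
        | [a1, a2] =>
          let b1 := target - a1
          let b2 := target - a2
          let result := if st.1.contains (b1, b2) then st.2 + st.1.getD (b1, b2) 0 else st.2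
          let dict := if st.1.contains (a1, a2)
                      then st.1.insert (a1, a2) (st.1.getD (a1, a2) 0 + 1)
                      else st.1.insert (a1, a2) 1
          (dict, result)
        | _ => st)
      (dict, res)).2 = res + pvM target seen ds := by
  induction ds with
  | nil => intro dict res seen _ _; simp [pvM]
  | cons d ds ih =>
    intro dict res seen hc hg
    match d with
    | [] => simpa [pvM] using ih dict res seen hc hg
    | [a] => simpa [pvM] using ih dict res seen hc hg
    | a1 :: a2 :: a3 :: rest => simpa [pvM] using ih dict res seen hc hg
    | [a1, a2] =>
      simp only [List.foldl_cons]
      have hres : (if dict.contains (target - a1, target - a2)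
            then res + dict.getD (target - a1, target - a2) 0 else res)
          = res + (seen.count (target - a1, target - a2) : Int) := by
        rw [hc, hg]
        by_cases hm : (target - a1, target - a2) ∈ seen
        · simp [hm]
        · simp [hm, List.count_eq_zero_of_not_mem hm]
      set dict' := if dict.contains (a1, a2)
          then dict.insert (a1, a2) (dict.getD (a1, a2) 0 + 1)
          else dict.insert (a1, a2) 1 with hdict'
      have hc' : ∀ k, dict'.contains k = decide (k ∈ (a1, a2) :: seen) := by
        intro k
        have hci : ∀ v : Int, (dict.insert (a1, a2) v).contains k
            = decide (k ∈ (a1, a2) :: seen) := by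
          intro v
          rw [PySem.Dict.contains_insert, hc]
          by_cases hk : k = (a1, a2) <;> simp [hk]
        rw [hdict']; split <;> exact hci _
      have hg' : ∀ k, dict'.getD k 0 = (((a1, a2) :: seen).count k : Int) := by
        intro k
        by_cases hm : dict.contains (a1, a2) = true
        · rw [hdict', if_pos hm, PySem.Dict.getD_insert]
          by_cases hk : k = (a1, a2)
          · subst hk
            rw [if_pos rfl, hg, List.count_cons_self]; push_cast; ring
          · rw [if_neg hk, hg, List.count_cons_of_ne (fun h => hk h.symm)]
        · have hnm : (a1, a2) ∉ seen := by
            intro hmem; exact hm (by rw [hc]; simp [hmem])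
          rw [hdict', if_neg hm, PySem.Dict.getD_insert]
          by_cases hk : k = (a1, a2)
          · subst hk
            rw [if_pos rfl, List.count_cons_self,
              List.count_eq_zero_of_not_mem hnm]
            norm_num
          · rw [if_neg hk, hg, List.count_cons_of_ne (fun h => hk h.symm)]
      rw [ih dict' _ ((a1, a2) :: seen) hc' hg']
      simp only [pvM, hres]
      ring

theorem pvA_eq_pvM (dominoes : List (List Int)) (target : Int) :
    two_sum_second_variant dominoes target = pvM target [] dominoes := by
  unfold two_sum_second_variant
  rw [pvA_loop target dominoes PySem.Dict.empty 0 [] (by simp) (by simp)]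
  simp

theorem pvCross_cons (target : Int) (seen : List (Int × Int)) (d : List Int)
    (ds : List (List Int)) :
    pvCross target seen (d :: ds)
      = pvCross target seen ds
        + (seen.countP (fun p => d = [target - p.1, target - p.2]) : Int) := by
  unfold pvCross
  induction seen with
  | nil => simp
  | cons p seen ih =>
    simp only [List.map_cons, List.sum_cons, ih, List.countP_cons]
    by_cases h : d = [target - p.1, target - p.2]
    · simp [h]; ring
    · simp [h]; ring

theorem pvCross_cons_pair (target a1 a2 : Int) (seen : List (Int × Int)) (ds : List (List Int)) :
    pvCross target seen ([a1, a2] :: ds)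
      = pvCross target seen ds + (seen.count (target - a1, target - a2) : Int) := by
  rw [pvCross_cons]
  congr 2
  rw [List.count_eq_countP]
  apply List.countP_congr
  intro p _
  simp only [decide_eq_true_eq, beq_iff_eq]
  constructor
  · intro h
    have h1 : a1 = target - p.1 := by injection h
    have h2 : [a2] = [target - p.2] := by injection h
    have h2' : a2 = target - p.2 := by injection h2
    rw [Prod.ext_iff]; constructor <;> simp <;> omega
  · intro h; subst h; simp

theorem pvCross_cons_bad (target : Int) (seen : List (Int × Int)) (d : List Int)
    (hd : d.length ≠ 2) (ds : List (List Int)) :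
    pvCross target seen (d :: ds) = pvCross target seen ds := by
  rw [pvCross_cons]
  have : seen.countP (fun p => d = [target - p.1, target - p.2]) = 0 := by
    apply List.countP_eq_zero.mpr
    intro p _
    simp only [decide_eq_true_eq]
    intro h; apply hd; rw [h]; rfl
  rw [this]; simp

theorem pvM_eq_altGo (target : Int) (ds : List (List Int)) :
    ∀ seen, pvM target seen ds = pvAltGo target ds + pvCross target seen ds := by
  induction ds with
  | nil => intro seen; simp [pvM, pvAltGo, pvCross]
  | cons d ds ih =>
    intro seen
    match d with
    | [] =>
      rw [pvCross_cons_bad target seen [] (by simp) ds]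
      simp only [pvM, pvAltGo, pvAltPair, ih seen]
      norm_num
    | [a] =>
      rw [pvCross_cons_bad target seen [a] (by simp) ds]
      simp only [pvM, pvAltGo, pvAltPair, ih seen]
      norm_num
    | a1 :: a2 :: a3 :: rest =>
      rw [pvCross_cons_bad target seen (a1 :: a2 :: a3 :: rest) (by simp) ds]
      simp only [pvM, pvAltGo, pvAltPair, ih seen]
      rw [if_neg (by simp)]; ring
    | [a1, a2] =>
      simp only [pvM, pvAltGo, pvAltPair, ih ((a1, a2) :: seen),
        pvCross_cons_pair]
      norm_num
      have : pvCross target ((a1, a2) :: seen) ds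
          = (ds.count [target - a1, target - a2] : Int) + pvCross target seen ds := by
        unfold pvCross; simp
      rw [this]; ring

-- ===== VERDICT (by name: the statement is the Claim_ definition above) =====
theorem two_sum_second_variant_spec : Claim_equal_two_sum_second_variant := by
  intro dominoes target _ _
  unfold Spec_two_sum_second_variant two_sum_second_variant_alt
  rw [pvA_eq_pvM, pvM_eq_altGo]
  simp [pvCross]
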